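-- pv_equiv track=rewrite | github.com/google/arolla | py/arolla/expr/containers.py | _extract_all_namespaces
-- ===== SOURCE A (Python) =====
-- from typing import Collection, Iterator, Mapping
--
-- def _extract_all_namespaces(name: str) -> Iterator[str]:
--   """Yields all namespace: 'a.b.name' -> 'a', 'a.b', 'a.b.name'."""
--   if not name:
--     return
--   i = name.find('.')
--   while i != -1:
--     yield name[:i]
--     i = name.find('.', i + 1)
--   yield name
-- ===== SOURCE B (Python) =====
-- def _extract_all_namespaces(name: str):
--   """Yields all namespaces: single left-to-right character scan with a running prefix."""
--   if not name:
--     return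
--   acc = ''
--   for ch in name:
--     if ch == '.':
--       yield acc
--     acc += ch
--   yield acc
-- ===== Notes on version B (the rewrite author's own statement) =====
-- stated objective: simpler
-- what changed: Replaced the repeated str.find scanning loop with a single left-to-right character scan that keeps a running prefix and yields it at each dot and at the end.
import Mathlib
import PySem

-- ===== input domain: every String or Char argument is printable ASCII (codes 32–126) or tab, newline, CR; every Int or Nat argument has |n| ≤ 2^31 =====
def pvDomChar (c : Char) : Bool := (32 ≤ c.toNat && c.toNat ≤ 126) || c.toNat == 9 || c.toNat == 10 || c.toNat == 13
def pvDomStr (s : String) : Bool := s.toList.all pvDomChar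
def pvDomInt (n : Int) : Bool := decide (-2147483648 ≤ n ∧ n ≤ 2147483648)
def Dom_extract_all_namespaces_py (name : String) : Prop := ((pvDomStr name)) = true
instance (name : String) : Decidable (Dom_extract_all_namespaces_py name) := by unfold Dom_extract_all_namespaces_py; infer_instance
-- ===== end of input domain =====

-- B replaces A's repeated str.find loop by a single character scan with a
-- running prefix (objective: simpler single pass).

-- ===== PORT A =====
-- A's while-loop: i = name.find('.'); while i != -1: yield name[:i]; i = name.find('.', i+1).
-- fuel = length + 1 is always sufficient (each found index strictly increases); at loop
-- exit the final `yield name` happens.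
def pvAGo (s : List Char) (i : Int) (fuel : Nat) : List (List Char) :=
  match fuel with
  | 0 => [s]
  | fuel + 1 =>
    if i = -1 then [s]
    else PySem.Chars.slice s none (some i) ::
      pvAGo s (PySem.Chars.findFrom s ['.'] (i + 1)) fuel

def extract_all_namespaces_py (name : String) : List String :=
  if name = "" then []
  else (pvAGo name.toList (PySem.Chars.find name.toList ['.'])
          (name.toList.length + 1)).map (fun l => String.ofList l)

-- ===== PORT B =====
-- B: acc = ''; for ch in name: (if ch == '.': yield acc); acc += ch; finally yield acc.
def extract_all_namespaces_py_alt (name : String) : List String :=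
  if name = "" then []
  else
    let st := name.toList.foldl
      (fun (st : List (List Char) × List Char) ch =>
        (if ch = '.' then st.1 ++ [st.2] else st.1, st.2 ++ [ch])) ([], [])
    (st.1 ++ [st.2]).map (fun l => String.ofList l)

-- ===== PRECONDITION & SPEC =====
def Spec_extract_all_namespaces_py (name : String) (out : List String) : Prop := out = extract_all_namespaces_py_alt name
instance (name : String) (out : List String) : Decidable (Spec_extract_all_namespaces_py name out) := by unfold Spec_extract_all_namespaces_py; infer_instance

-- ===== CLAIM (what is proved, stated in full; the proofs are below) =====
def Claim_equal_extract_all_namespaces_py : Prop := ∀ (name : String), Dom_extract_all_namespaces_py name → Spec_extract_all_namespaces_py name (extract_all_namespaces_py name)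

-- ===== LEMMAS AND PROOFS =====

-- Common specification: scan the remaining characters, keeping the already-seen prefix.
def pvSpec (pre : List Char) : List Char → List (List Char)
  | [] => [pre]
  | c :: t => if c = '.' then pre :: pvSpec (pre ++ [c]) t else pvSpec (pre ++ [c]) t

lemma pvSingle_prefix_iff (c : Char) (l : List Char) : [c] <+: l ↔ l.head? = some c := by
  cases l with
  | nil => simp
  | cons d t =>
    constructor
    · rintro ⟨u, hu⟩; simp at hu; simp [hu.1]
    · intro h; simp at h; exact ⟨t, by simp [h]⟩

lemma pvSpec_no_dot (pre t : List Char) (h : '.' ∉ t) : pvSpec pre t = [pre ++ t] := by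
  induction t generalizing pre with
  | nil => simp [pvSpec]
  | cons c u ih =>
    have hc : c ≠ '.' := fun hc => h (by simp [hc])
    simp [pvSpec, hc, ih (pre ++ [c]) (fun hm => h (by simp [hm]))]

-- B's foldl realises pvSpec.
lemma pvFoldl_spec (t : List Char) (out : List (List Char)) (pre : List Char) :
    (t.foldl (fun (st : List (List Char) × List Char) ch =>
        (if ch = '.' then st.1 ++ [st.2] else st.1, st.2 ++ [ch])) (out, pre)).1 ++
      [(t.foldl (fun (st : List (List Char) × List Char) ch =>
        (if ch = '.' then st.1 ++ [st.2] else st.1, st.2 ++ [ch])) (out, pre)).2] =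
    out ++ pvSpec pre t := by
  induction t generalizing out pre with
  | nil => simp [pvSpec]
  | cons c u ih =>
    by_cases hc : c = '.'
    · simp [List.foldl_cons, hc, pvSpec, ih]
    · simp [List.foldl_cons, hc, pvSpec, ih]

-- pvSpec splits at the first dot at absolute position i ≥ k.
lemma pvSpec_split (s : List Char) (i : Nat) (hi : i < s.length) (hd : s[i] = '.') :
    ∀ d k, k + d = i → (∀ j, k ≤ j → j < i → s[j]? ≠ some '.') →
    pvSpec (s.take k) (s.drop k) = s.take i :: pvSpec (s.take (i + 1)) (s.drop (i + 1)) := by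
  intro d
  induction d with
  | zero =>
    intro k hk _
    subst hk
    simp only [Nat.add_zero] at hi hd ⊢
    rw [List.drop_eq_getElem_cons hi, hd]
    have ht : List.take k s ++ ['.'] = List.take (k + 1) s := by
      rw [← List.take_concat_get hi, hd]; simp
    simp [pvSpec, ht]

  | succ d ih =>
    intro k hk hmin
    have hkl : k < s.length := by omega
    have hne : s[k] ≠ '.' := by
      intro h
      exact hmin k le_rfl (by omega) (by simp [List.getElem?_eq_getElem hkl, h])
    rw [List.drop_eq_getElem_cons hkl]
    have ht : List.take k s ++ [s[k]] = List.take (k + 1) s := by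
      rw [← List.take_concat_get hkl]; simp
    simp only [pvSpec, if_neg hne, ht]
    exact ih (k + 1) (by omega) (fun j hj hji => hmin j (by omega) hji)

-- A's find-loop realises pvSpec.
lemma pvAGo_spec (s : List Char) (k : Nat) (hk : k ≤ s.length) (fuel : Nat)
    (hf : s.length + 1 - k ≤ fuel) :
    pvAGo s (PySem.Chars.findFrom s ['.'] (k : Int)) fuel = pvSpec (s.take k) (s.drop k) := by
  induction fuel generalizing k with
  | zero => omega
  | succ fuel ih =>
    by_cases hneg : PySem.Chars.findFrom s ['.'] (k : Int) = -1
    · rw [pvAGo, if_pos hneg]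
      have hno : '.' ∉ s.drop k := by
        intro hm
        exact (PySem.Chars.findFrom_natCast_eq_neg_one_iff s ['.'] k hk).mp hneg
          ((List.singleton_infix_iff '.' (s.drop k)).mpr hm)
      rw [pvSpec_no_dot _ _ hno, List.take_append_drop]
    · obtain ⟨hge, hpre, hmin⟩ := PySem.Chars.findFrom_natCast_spec s ['.'] k hk hneg
      set i := PySem.Chars.findFrom s ['.'] (k : Int) with hidef
      have h0 : 0 ≤ i := le_trans (by exact_mod_cast Nat.zero_le k) hge
      have hkle : k ≤ i.toNat := by omega
      have hlt : i.toNat < s.length := by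
        rcases hpre with ⟨u, hu⟩
        have := congrArg List.length hu
        simp at this
        omega
      have hd : s[i.toNat] = '.' := by
        have := (pvSingle_prefix_iff '.' (s.drop i.toNat)).mp hpre
        rw [List.head?_drop] at this
        simpa [List.getElem?_eq_getElem hlt] using this
      rw [pvAGo, if_neg hneg, PySem.Chars.slice_eq_listSlice, PySem.List.slice_to s h0]
      have hcast : i + 1 = ((i.toNat + 1 : Nat) : Int) := by omega
      rw [hcast, ih (i.toNat + 1) (by omega) (by omega)]
      rw [pvSpec_split s i.toNat hlt hd (i.toNat - k) k (by omega)
        (fun j hj hji hget => by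
          refine hmin j hj hji ?_
          rw [pvSingle_prefix_iff, List.head?_drop]
          exact hget)]

-- ===== VERDICT (by name: the statement is the Claim_ definition above) =====
theorem extract_all_namespaces_py_spec : Claim_equal_extract_all_namespaces_py := by
  intro name _
  unfold Spec_extract_all_namespaces_py extract_all_namespaces_py extract_all_namespaces_py_alt
  by_cases h : name = ""
  · simp [h]
  · rw [if_neg h, if_neg h]
    have hA := pvAGo_spec name.toList 0 (Nat.zero_le _) (name.toList.length + 1) (by omega)
    rw [Nat.cast_zero, PySem.Chars.findFrom_zero] at hA
    simp only [List.take_zero, List.drop_zero] at hA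
    have hB := pvFoldl_spec name.toList [] []
    simp only [List.nil_append] at hB
    rw [hA]
    exact congrArg (List.map _) hB.symm
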